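-- pv_equiv track=rewrite | github.com/stone12222/stone12222.github.io | _a/ccc_senior/BinarySearch/binTest.py | getDis
-- ===== SOURCE A (Python) =====
-- def getDis(X,Y):
--   max_dis=0
--
--   for i in range(len(X)):
--       for j in range(i,len(Y)):
--           if Y[j]>=X[i]:
--               dis=j-i
--               max_dis=max(dis,max_dis)
--   return max_dis
-- ===== SOURCE B (Python) =====
-- def getDis(X, Y):
--     m = len(Y)
--     # S[j] = max(Y[j:]) — suffix maxima, built right to left
--     S = [0] * m
--     for j in range(m - 1, -1, -1):
--         S[j] = Y[j] if j == m - 1 else max(Y[j], S[j + 1])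
--     ans = 0
--     for i in range(len(X)):
--         x = X[i]
--         if i >= m or S[i] < x:
--             continue
--         # binary search: first index in [i, m] at which S < x
--         lo, hi = i, m
--         while lo < hi:
--             mid = (lo + hi) // 2
--             if S[mid] >= x:
--                 lo = mid + 1
--             else:
--                 hi = mid
--         ans = max(ans, lo - 1 - i)
--     return ans
-- ===== Notes on version B (the rewrite author's own statement) =====
-- stated objective: faster
-- what changed: Replaced the nested scan over all pairs (i,j) by a suffix-maximum array of Y plus, for each i, a binary search for the last position whose suffix maximum still reaches X[i].
import Mathlib
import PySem

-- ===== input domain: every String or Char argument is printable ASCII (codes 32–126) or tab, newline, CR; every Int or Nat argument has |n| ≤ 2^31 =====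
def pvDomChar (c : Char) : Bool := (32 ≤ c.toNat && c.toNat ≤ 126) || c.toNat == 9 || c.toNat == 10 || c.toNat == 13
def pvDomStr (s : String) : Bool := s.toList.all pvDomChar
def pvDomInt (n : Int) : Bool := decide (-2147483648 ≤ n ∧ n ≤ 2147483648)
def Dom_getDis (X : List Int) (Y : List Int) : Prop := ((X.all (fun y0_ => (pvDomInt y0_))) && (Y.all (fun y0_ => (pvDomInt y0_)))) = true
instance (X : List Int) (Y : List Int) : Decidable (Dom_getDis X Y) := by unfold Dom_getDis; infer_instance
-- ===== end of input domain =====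

-- B replaces A's scan over all pairs (i,j) by a suffix-maximum array of Y plus one binary
-- search per i (objective: faster, O(m + n log m) instead of O(n*m)).

-- ===== PORT A =====
def getDis (X : List Int) (Y : List Int) : Int :=
  (PySem.List.pyRange 0 X.length 1).foldl (fun md i =>
    (PySem.List.pyRange i Y.length 1).foldl (fun md2 j =>
      if PySem.List.pyGetD X i 0 ≤ PySem.List.pyGetD Y j 0 then max (j - i) md2 else md2) md) 0

-- ===== PORT B =====
-- suffix maxima of Y (S[j] = max(Y[j:])), built right to left as in Source B
def pvSufMax : List Int → List Int
  | [] => []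
  | y :: ys =>
    match pvSufMax ys with
    | [] => [y]
    | s :: ss => max y s :: s :: ss

-- hand-written binary search from Source B: first index in [lo, hi] with S[idx] < x
def pvBSearch (S : List Int) (x lo hi : Int) : Int :=
  if _h : lo < hi then
    if x ≤ PySem.List.pyGetD S (PySem.Int.floordiv (lo + hi) 2) 0 then
      pvBSearch S x (PySem.Int.floordiv (lo + hi) 2 + 1) hi
    else pvBSearch S x lo (PySem.Int.floordiv (lo + hi) 2)
  else lo
termination_by (hi - lo).toNat
decreasing_by
  · have := PySem.Int.floordiv_two_mid_bounds (le_of_lt _h) (lo := lo) (hi := hi)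
    omega
  · have hmidlt : PySem.Int.floordiv (lo + hi) 2 < hi :=
      (PySem.Int.floordiv_lt_iff_lt_mul (by norm_num)).2 (by omega)
    have := PySem.Int.floordiv_two_mid_bounds (le_of_lt _h) (lo := lo) (hi := hi)
    omega

def getDis_alt (X : List Int) (Y : List Int) : Int :=
  let m : Int := Y.length
  let S := pvSufMax Y
  (PySem.List.pyRange 0 X.length 1).foldl (fun ans i =>
    let x := PySem.List.pyGetD X i 0
    if m ≤ i then ans
    else if PySem.List.pyGetD S i 0 < x then ans
    else max ans (pvBSearch S x i m - 1 - i)) 0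

-- ===== PRECONDITION & SPEC =====
def Spec_getDis (X : List Int) (Y : List Int) (out : Int) : Prop := out = getDis_alt X Y
instance (X : List Int) (Y : List Int) (out : Int) : Decidable (Spec_getDis X Y out) := by unfold Spec_getDis; infer_instance

-- ===== CLAIM (what is proved, stated in full; the proofs are below) =====
def Claim_equal_getDis : Prop := ∀ (X : List Int) (Y : List Int), Dom_getDis X Y → Spec_getDis X Y (getDis X Y)

-- ===== LEMMAS AND PROOFS =====

theorem pvSufMax_length (Y : List Int) : (pvSufMax Y).length = Y.length := by
  induction Y with
  | nil => rfl
  | cons y ys ih =>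
    simp only [pvSufMax]
    cases h : pvSufMax ys with
    | nil => simp_all
    | cons s ss => simp_all

-- characterisation of the suffix maxima (Nat indices)
theorem pvSufMax_getD (Y : List Int) (k : Nat) (hk : k < Y.length) (x : Int) :
    x ≤ (pvSufMax Y).getD k 0 ↔ ∃ k', k ≤ k' ∧ k' < Y.length ∧ x ≤ Y.getD k' 0 := by
  induction Y generalizing k with
  | nil => simp at hk
  | cons y ys ih =>
    cases k with
    | zero =>
      simp only [pvSufMax]
      cases h : pvSufMax ys with
      | nil =>
        have hys : ys = [] := by
          have hl := pvSufMax_length ys; rw [h] at hl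
          exact List.length_eq_zero_iff.1 hl.symm
        subst hys
        constructor
        · intro hx; exact ⟨0, le_refl _, by simp, by simpa using hx⟩
        · rintro ⟨k', -, hk', hx⟩
          simp only [List.length_cons, List.length_nil] at hk'
          have hk0 : k' = 0 := by omega
          subst hk0; simpa using hx
      | cons s ss =>
        have hlen : 0 < ys.length := by
          have hl := pvSufMax_length ys; rw [h] at hl; simp at hl; omega
        have ihs := ih 0 hlen
        rw [h] at ihs
        simp only [List.getD_cons_zero] at ihs ⊢
        rw [le_max_iff]
        constructor
        · rintro (hx | hx)
          · exact ⟨0, by omega, by simp, by simpa using hx⟩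
          · rcases ihs.1 hx with ⟨k', -, hk', hx'⟩
            exact ⟨k' + 1, by omega, by simpa using hk', by simpa using hx'⟩
        · rintro ⟨k', -, hk', hx⟩
          cases k' with
          | zero => left; simpa using hx
          | succ n =>
            right
            exact ihs.2 ⟨n, by omega, by simpa using hk', by simpa using hx⟩
    | succ n =>
      have hstep : (pvSufMax (y :: ys)).getD (n + 1) 0 = (pvSufMax ys).getD n 0 := by
        simp only [pvSufMax]
        cases h : pvSufMax ys with
        | nil => simp
        | cons s ss => simp
      rw [hstep]
      have hn : n < ys.length := by simpa using hk
      rw [ih n hn]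
      constructor
      · rintro ⟨k', hle, hk', hx⟩
        exact ⟨k' + 1, by omega, by simpa using hk', by simpa using hx⟩
      · rintro ⟨k', hle, hk', hx⟩
        cases k' with
        | zero => omega
        | succ j => exact ⟨j, by omega, by simpa using hk', by simpa using hx⟩

-- Int-index wrapper
theorem pvSufMax_pyGetD (Y : List Int) (j : Int) (h0 : 0 ≤ j) (h1 : j < Y.length) (x : Int) :
    x ≤ PySem.List.pyGetD (pvSufMax Y) j 0 ↔
      ∃ j' : Int, j ≤ j' ∧ j' < Y.length ∧ x ≤ PySem.List.pyGetD Y j' 0 := by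
  have hj : j = ((j.toNat : Nat) : Int) := by omega
  rw [hj, PySem.List.pyGetD_natCast]
  have hk : j.toNat < Y.length := by omega
  rw [pvSufMax_getD Y j.toNat hk x]
  constructor
  · rintro ⟨k', hk1, hk2, hk3⟩
    refine ⟨(k' : Int), by omega, by omega, ?_⟩
    rw [PySem.List.pyGetD_natCast]; exact hk3
  · rintro ⟨j', hj1, hj2, hj3⟩
    have hj' : j' = ((j'.toNat : Nat) : Int) := by omega
    rw [hj', PySem.List.pyGetD_natCast] at hj3
    exact ⟨j'.toNat, by omega, by omega, hj3⟩

theorem pvBSearch_spec (S : List Int) (x : Int)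
    (hanti : ∀ j1 j2 : Int, 0 ≤ j1 → j1 ≤ j2 → j2 < S.length →
      x ≤ PySem.List.pyGetD S j2 0 → x ≤ PySem.List.pyGetD S j1 0) :
    ∀ (lo hi : Int), 0 ≤ lo → lo ≤ hi → hi ≤ S.length →
      lo ≤ pvBSearch S x lo hi ∧ pvBSearch S x lo hi ≤ hi ∧
      (∀ j, lo ≤ j → j < pvBSearch S x lo hi → x ≤ PySem.List.pyGetD S j 0) ∧
      (pvBSearch S x lo hi < hi → ¬ x ≤ PySem.List.pyGetD S (pvBSearch S x lo hi) 0) := by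
  have main : ∀ (fuel : Nat) (lo hi : Int), (hi - lo).toNat ≤ fuel → 0 ≤ lo → lo ≤ hi →
      hi ≤ S.length →
      lo ≤ pvBSearch S x lo hi ∧ pvBSearch S x lo hi ≤ hi ∧
      (∀ j, lo ≤ j → j < pvBSearch S x lo hi → x ≤ PySem.List.pyGetD S j 0) ∧
      (pvBSearch S x lo hi < hi → ¬ x ≤ PySem.List.pyGetD S (pvBSearch S x lo hi) 0) := by
    intro fuel
    induction fuel with
    | zero =>
      intro lo hi hf h0 hlh hhi
      have heq : lo = hi := by omega
      rw [pvBSearch, dif_neg (by omega)]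
      exact ⟨le_refl _, hlh, fun j h1 h2 => by omega, fun h => by omega⟩
    | succ f ihf =>
      intro lo hi hf h0 hlh hhi
      by_cases hlt : lo < hi
      · have hb := PySem.Int.floordiv_two_mid_bounds (le_of_lt hlt) (lo := lo) (hi := hi)
        have hmlt : PySem.Int.floordiv (lo + hi) 2 < hi :=
          (PySem.Int.floordiv_lt_iff_lt_mul (by norm_num)).2 (by omega)
        rw [pvBSearch, dif_pos hlt]
        by_cases hp : x ≤ PySem.List.pyGetD S (PySem.Int.floordiv (lo + hi) 2) 0
        · rw [if_pos hp]
          obtain ⟨r1, r2, r3, r4⟩ :=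
            ihf (PySem.Int.floordiv (lo + hi) 2 + 1) hi (by omega) (by omega) (by omega) hhi
          refine ⟨by omega, r2, ?_, r4⟩
          intro j hj1 hj2
          by_cases hjm : PySem.Int.floordiv (lo + hi) 2 + 1 ≤ j
          · exact r3 j hjm hj2
          · exact hanti j (PySem.Int.floordiv (lo + hi) 2) (by omega) (by omega) (by omega) hp
        · rw [if_neg hp]
          obtain ⟨r1, r2, r3, r4⟩ :=
            ihf lo (PySem.Int.floordiv (lo + hi) 2) (by omega) h0 (by omega) (by omega)
          refine ⟨r1, by omega, r3, ?_⟩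
          intro hr
          by_cases hrm : pvBSearch S x lo (PySem.Int.floordiv (lo + hi) 2) <
              PySem.Int.floordiv (lo + hi) 2
          · exact r4 hrm
          · have hre : pvBSearch S x lo (PySem.Int.floordiv (lo + hi) 2) =
                PySem.Int.floordiv (lo + hi) 2 := by omega
            rw [hre]; exact hp
      · rw [pvBSearch, dif_neg hlt]
        exact ⟨le_refl _, hlh, fun j h1 h2 => by omega, fun h => absurd h hlt⟩
  intro lo hi h0 hlh hhi
  exact main (hi - lo).toNat lo hi (le_refl _) h0 hlh hhi

theorem pv_foldl_max_absorb (f : Int → Int) (L : List Int) (acc : Int)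
    (h : ∀ j ∈ L, f j ≤ acc) :
    L.foldl (fun a j => max (f j) a) acc = acc := by
  induction L generalizing acc with
  | nil => rfl
  | cons a t ih =>
    simp only [List.foldl_cons]
    have ha : f a ≤ acc := h a (by simp)
    rw [max_eq_right ha]
    exact ih acc (fun j hj => h j (by simp [hj]))

theorem pv_foldl_max_eq (f : Int → Int) (L : List Int) (acc J : Int)
    (hJ : J ∈ L) (hmax : ∀ j ∈ L, f j ≤ f J) :
    L.foldl (fun a j => max (f j) a) acc = max acc (f J) := by
  induction L generalizing acc with
  | nil => simp at hJ
  | cons a t ih =>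
    simp only [List.foldl_cons]
    by_cases hJt : J ∈ t
    · rw [ih (max (f a) acc) hJt (fun j hj => hmax j (List.mem_cons_of_mem a hj))]
      have ha : f a ≤ f J := hmax a (by simp)
      rw [max_comm (f a) acc, max_assoc, max_eq_right ha]
    · have hJa : J = a := by
        rcases List.mem_cons.1 hJ with h | h
        · exact h
        · exact absurd h hJt
      subst hJa
      rw [pv_foldl_max_absorb f t (max (f J) acc)
        (fun j hj => le_trans (hmax j (by simp [hj])) (le_max_left _ _))]
      exact max_comm _ _

theorem pv_foldl_congr_inv {α : Type} (l : List α) (f g : Int → α → Int) (init : Int)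
    (P : Int → Prop) (h0 : P init)
    (hpres : ∀ acc x, x ∈ l → P acc → P (f acc x))
    (heq : ∀ acc x, x ∈ l → P acc → f acc x = g acc x) :
    l.foldl f init = l.foldl g init := by
  induction l generalizing init with
  | nil => rfl
  | cons a t ih =>
    simp only [List.foldl_cons]
    rw [← heq init a (by simp) h0]
    exact ih (f init a) (hpres init a (by simp) h0)
      (fun acc x hx => hpres acc x (by simp [hx]))
      (fun acc x hx => heq acc x (by simp [hx]))

-- the key per-i lemma: A's inner loop equals B's suffix-max + binary-search step
theorem pv_step_eq (X Y : List Int) (i : Int) (h0 : 0 ≤ i) (acc : Int) :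
    (PySem.List.pyRange i Y.length 1).foldl (fun md2 j =>
        if PySem.List.pyGetD X i 0 ≤ PySem.List.pyGetD Y j 0 then max (j - i) md2 else md2) acc
      = (if (Y.length : Int) ≤ i then acc
         else if PySem.List.pyGetD (pvSufMax Y) i 0 < PySem.List.pyGetD X i 0 then acc
         else max acc (pvBSearch (pvSufMax Y) (PySem.List.pyGetD X i 0) i Y.length - 1 - i)) := by
  set x := PySem.List.pyGetD X i 0 with hxdef
  by_cases him : (Y.length : Int) ≤ i
  · rw [if_pos him, PySem.List.pyRange_one_eq_nil him]
    rfl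
  · rw [if_neg him]
    rw [not_le] at him
    rw [PySem.List.foldl_ite_eq_foldl_filter]
    set L := (PySem.List.pyRange i (Y.length : Int) 1).filter
      (fun j => decide (x ≤ PySem.List.pyGetD Y j 0)) with hLdef
    have hanti : ∀ j1 j2 : Int, 0 ≤ j1 → j1 ≤ j2 → j2 < (pvSufMax Y).length →
        x ≤ PySem.List.pyGetD (pvSufMax Y) j2 0 → x ≤ PySem.List.pyGetD (pvSufMax Y) j1 0 := by
      intro j1 j2 hj1 hj12 hj2 hx2
      rw [pvSufMax_length] at hj2
      rw [pvSufMax_pyGetD Y j2 (by omega) (by omega)] at hx2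
      rw [pvSufMax_pyGetD Y j1 (by omega) (by omega)]
      obtain ⟨j', ha, hb, hc⟩ := hx2
      exact ⟨j', by omega, hb, hc⟩
    by_cases hSi : PySem.List.pyGetD (pvSufMax Y) i 0 < x
    · rw [if_pos hSi]
      have hL : L = [] := by
        rw [hLdef]
        apply List.filter_eq_nil_iff.2
        intro j hj
        rcases PySem.List.mem_pyRange_one.1 hj with ⟨hj1, hj2⟩
        simp only [decide_eq_true_eq]
        intro hxj
        have : x ≤ PySem.List.pyGetD (pvSufMax Y) i 0 := by
          rw [pvSufMax_pyGetD Y i (by omega) (by omega)]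
          exact ⟨j, hj1, hj2, hxj⟩
        omega
      rw [hL]
      rfl
    · rw [if_neg hSi]
      rw [not_lt] at hSi
      obtain ⟨r1, r2, r3, r4⟩ := pvBSearch_spec (pvSufMax Y) x hanti i (Y.length : Int)
        h0 (le_of_lt him) (by rw [pvSufMax_length])
      set r := pvBSearch (pvSufMax Y) x i (Y.length : Int) with hrdef
      have hir : i < r := by
        by_contra hcon
        have hre : r = i := by omega
        exact (hre ▸ r4 (by omega)) hSi
      have hPr1 : x ≤ PySem.List.pyGetD (pvSufMax Y) (r - 1) 0 := r3 (r - 1) (by omega) (by omega)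
      have hnotge : ∀ j : Int, r ≤ j → j < (Y.length : Int) →
          ¬ x ≤ PySem.List.pyGetD Y j 0 := by
        intro j hjr hjm hxj
        have hrm : r < (Y.length : Int) := by omega
        have hxr : x ≤ PySem.List.pyGetD (pvSufMax Y) r 0 := by
          rw [pvSufMax_pyGetD Y r (by omega) hrm]
          exact ⟨j, hjr, hjm, hxj⟩
        exact r4 hrm hxr
      have hYr : x ≤ PySem.List.pyGetD Y (r - 1) 0 := by
        rw [pvSufMax_pyGetD Y (r - 1) (by omega) (by omega)] at hPr1
        obtain ⟨j', ha, hb, hc⟩ := hPr1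
        by_cases hjr : j' ≤ r - 1
        · have : j' = r - 1 := by omega
          rw [← this]; exact hc
        · exact absurd hc (hnotge j' (by omega) hb)
      have hmem : (r - 1) ∈ L := by
        rw [hLdef, List.mem_filter]
        exact ⟨PySem.List.mem_pyRange_one.2 ⟨by omega, by omega⟩, by simpa using hYr⟩
      have hmax : ∀ j ∈ L, j - i ≤ (r - 1) - i := by
        intro j hj
        rw [hLdef, List.mem_filter] at hj
        rcases PySem.List.mem_pyRange_one.1 hj.1 with ⟨hj1, hj2⟩
        have hxj : x ≤ PySem.List.pyGetD Y j 0 := by simpa using hj.2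
        have hjlt : j < r := by
          by_contra hcon
          exact hnotge j (by omega) hj2 hxj
        omega
      exact pv_foldl_max_eq (fun j => j - i) L acc (r - 1) hmem hmax

-- ===== VERDICT (by name: the statement is the Claim_ definition above) =====
theorem getDis_spec : Claim_equal_getDis := by
  intro X Y _
  unfold Spec_getDis getDis getDis_alt
  apply pv_foldl_congr_inv _ _ _ _ (fun acc => True) trivial
  · intro acc i _ _; trivial
  · intro acc i hi _
    have h0 : 0 ≤ i := (PySem.List.mem_pyRange_one.1 hi).1
    exact pv_step_eq X Y i h0 acc
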